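-- pv_equiv track=rewrite | github.com/6210qwe/leetcode_py | leetcode_solutions/by_id/q2072.py | max_of_min_subarray
-- ===== SOURCE A (Python) =====
-- from typing import List, Optional
--
-- def max_of_min_subarray(nums: List[int]) -> int:
--     """
--     函数式接口 - 实现最优解法
--     """
--     n = len(nums)
--     left_bound = [0] * n
--     right_bound = [n - 1] * n
--     stack = []
--
--     # 找到每个元素左侧第一个小于它的位置
--     for i in range(n):
--         while stack and nums[stack[-1]] >= nums[i]:
--             stack.pop()
--         if stack:
--             left_bound[i] = stack[-1] + 1
--         stack.append(i)
--
--     stack = []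
--
--     # 找到每个元素右侧第一个小于它的位置
--     for i in range(n - 1, -1, -1):
--         while stack and nums[stack[-1]] >= nums[i]:
--             stack.pop()
--         if stack:
--             right_bound[i] = stack[-1] - 1
--         stack.append(i)
--
--     # 计算每个元素作为子数组最小值的最大值
--     result = 0
--     for i in range(n):
--         min_val = nums[i]
--         subarray_length = right_bound[i] - left_bound[i] + 1
--         result = max(result, min_val * subarray_length)
--
--     return result
-- ===== SOURCE B (Python) =====
-- from typing import List, Optional
--
-- def max_of_min_subarray(nums: List[int]) -> int:
--     # Pointer-jumping DP ("path compression") instead of monotonic stacks: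
--     # left[i] / right[i] are found by jumping over already-computed spans.
--     n = len(nums)
--     left = [0] * n
--     right = [0] * n
--     for i in range(n):
--         l = i
--         while l > 0 and nums[l - 1] >= nums[i]:
--             l = left[l - 1]
--         left[i] = l
--     for i in range(n - 1, -1, -1):
--         r = i
--         while r < n - 1 and nums[r + 1] >= nums[i]:
--             r = right[r + 1]
--         right[i] = r
--     res = 0
--     for i in range(n):
--         res = max(res, nums[i] * (right[i] - left[i] + 1))
--     return res
-- ===== Notes on version B (the rewrite author's own statement) =====
-- stated objective: alternative
-- what changed: The two monotonic index stacks of A are replaced by pointer-jumping (path-compression) over the already computed left/right bound arrays: to find the left bound of i, B repeatedly jumps l = left[l-1] over whole spans instead of popping a stack, and symmetrically for the right bounds.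
import Mathlib
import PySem

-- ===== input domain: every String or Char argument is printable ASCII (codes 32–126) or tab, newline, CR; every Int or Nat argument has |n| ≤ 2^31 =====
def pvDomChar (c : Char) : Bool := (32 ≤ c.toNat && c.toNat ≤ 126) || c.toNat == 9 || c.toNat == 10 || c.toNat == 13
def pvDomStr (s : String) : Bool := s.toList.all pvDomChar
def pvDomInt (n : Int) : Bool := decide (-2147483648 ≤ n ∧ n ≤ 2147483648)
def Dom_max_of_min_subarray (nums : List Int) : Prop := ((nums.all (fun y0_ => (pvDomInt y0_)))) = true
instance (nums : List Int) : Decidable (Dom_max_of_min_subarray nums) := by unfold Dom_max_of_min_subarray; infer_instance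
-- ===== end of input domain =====

-- B replaces A's two monotonic index stacks by pointer-jumping over the already
-- computed bound arrays (path-compression DP); objective: alternative algorithm.

-- ===== PORT A =====
-- Python's `while stack and nums[stack[-1]] >= nums[i]: stack.pop()`;
-- the stack is kept head = Python's top.  All list reads are at in-range
-- indices wherever Python returns, so nums[j] is ported as nums.getD j 0.
def popGE (nums : List Int) (v : Int) : List Nat → List Nat
  | [] => []
  | j :: s => if nums.getD j 0 ≥ v then popGE nums v s else j :: s

-- body of A's first loop: pop, set left_bound[i] if stack nonempty, push i
def stepAL (nums : List Int) (st : List Int × List Nat) (i : Nat) : List Int × List Nat :=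
  let s := popGE nums (nums.getD i 0) st.2
  let lb' := match s with
    | [] => st.1
    | j :: _ => st.1.set i ((j : Int) + 1)
  (lb', i :: s)

-- body of A's second loop
def stepAR (nums : List Int) (st : List Int × List Nat) (i : Nat) : List Int × List Nat :=
  let s := popGE nums (nums.getD i 0) st.2
  let rb' := match s with
    | [] => st.1
    | j :: _ => st.1.set i ((j : Int) - 1)
  (rb', i :: s)

def max_of_min_subarray (nums : List Int) : Int :=
  let n := nums.length
  let lb := ((List.range n).foldl (stepAL nums) (List.replicate n 0, [])).1
  let rb := (((List.range n).reverse).foldl (stepAR nums) (List.replicate n ((n : Int) - 1), [])).1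
  (List.range n).foldl (fun res i =>
    max res (nums.getD i 0 * (rb.getD i 0 - lb.getD i 0 + 1))) 0

-- ===== PORT B =====
-- `l = i; while l > 0 and nums[l-1] >= v: l = left[l-1]`.  The fuel argument
-- only makes the recursion total: on every state the fold reaches, l strictly
-- decreases, so fuel = length nums never runs out (proved below).
def jumpL (nums : List Int) (v : Int) (left : List Nat) : Nat → Nat → Nat
  | 0, l => l
  | fuel + 1, l =>
    if 0 < l ∧ nums.getD (l - 1) 0 ≥ v then jumpL nums v left fuel (left.getD (l - 1) 0)
    else l

-- `r = i; while r < n - 1 and nums[r+1] >= v: r = right[r+1]`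
def jumpR (nums : List Int) (v : Int) (right : List Nat) (n : Nat) : Nat → Nat → Nat
  | 0, r => r
  | fuel + 1, r =>
    if r < n - 1 ∧ nums.getD (r + 1) 0 ≥ v then jumpR nums v right n fuel (right.getD (r + 1) 0)
    else r

def stepBL (nums : List Int) (n : Nat) (left : List Nat) (i : Nat) : List Nat :=
  left.set i (jumpL nums (nums.getD i 0) left n i)

def stepBR (nums : List Int) (n : Nat) (right : List Nat) (i : Nat) : List Nat :=
  right.set i (jumpR nums (nums.getD i 0) right n n i)

def max_of_min_subarray_alt (nums : List Int) : Int :=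
  let n := nums.length
  let left := (List.range n).foldl (stepBL nums n) (List.replicate n 0)
  let right := ((List.range n).reverse).foldl (stepBR nums n) (List.replicate n 0)
  (List.range n).foldl (fun res i =>
    max res (nums.getD i 0 * ((right.getD i 0 : Int) - (left.getD i 0 : Int) + 1))) 0

-- ===== PRECONDITION & SPEC =====
def Spec_max_of_min_subarray (nums : List Int) (out : Int) : Prop := out = max_of_min_subarray_alt nums
instance (nums : List Int) (out : Int) : Decidable (Spec_max_of_min_subarray nums out) := by unfold Spec_max_of_min_subarray; infer_instance

-- ===== CLAIM (what is proved, stated in full; the proofs are below) =====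
def Claim_equal_max_of_min_subarray : Prop := ∀ (nums : List Int), Dom_max_of_min_subarray nums → Spec_max_of_min_subarray nums (max_of_min_subarray nums)

-- ===== LEMMAS AND PROOFS =====

-- left-bound / right-bound characterisations: the value both programs must store
def LchP (nums : List Int) (v : Int) (i l : Nat) : Prop :=
  l ≤ i ∧ (∀ k, l ≤ k → k < i → v ≤ nums.getD k 0) ∧ (l = 0 ∨ nums.getD (l - 1) 0 < v)

def RchP (nums : List Int) (v : Int) (n i r : Nat) : Prop :=
  i ≤ r ∧ r < n ∧ (∀ k, i < k → k ≤ r → v ≤ nums.getD k 0) ∧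
    (r = n - 1 ∨ nums.getD (r + 1) 0 < v)

lemma LchP_unique {nums : List Int} {v : Int} {i l l' : Nat}
    (h : LchP nums v i l) (h' : LchP nums v i l') : l = l' := by
  obtain ⟨h1, h2, h3⟩ := h
  obtain ⟨h1', h2', h3'⟩ := h'
  by_contra hne
  rcases Nat.lt_or_ge l l' with hlt | hge
  · rcases h3' with rfl | hv
    · omega
    · have := h2 (l' - 1) (by omega) (by omega); omega
  · have hlt : l' < l := by omega
    rcases h3 with rfl | hv
    · omega
    · have := h2' (l - 1) (by omega) (by omega); omega

lemma RchP_unique {nums : List Int} {v : Int} {n i r r' : Nat}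
    (h : RchP nums v n i r) (h' : RchP nums v n i r') : r = r' := by
  obtain ⟨h1, h2, h3, h4⟩ := h
  obtain ⟨h1', h2', h3', h4'⟩ := h'
  by_contra hne
  rcases Nat.lt_or_ge r r' with hlt | hge
  · rcases h4 with heq | hv
    · omega
    · have := h3' (r + 1) (by omega) (by omega); omega
  · have hlt : r' < r := by omega
    rcases h4' with heq | hv
    · omega
    · have := h3 (r' + 1) (by omega) (by omega); omega

-- basic facts about popGE (Python's while-pop)
lemma popGE_suffix (nums : List Int) (v : Int) (s : List Nat) : popGE nums v s <:+ s := by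
  induction s with
  | nil => simp [popGE]
  | cons a t ih =>
    rw [popGE]
    split
    · exact ih.trans (List.suffix_cons a t)
    · exact List.suffix_refl _

lemma popGE_mem {nums : List Int} {v : Int} {s : List Nat} {j : Nat}
    (h : j ∈ popGE nums v s) : j ∈ s := (popGE_suffix nums v s).subset h

lemma popGE_mem_of {nums : List Int} {v : Int} {s : List Nat} {j : Nat}
    (hj : j ∈ s) (hv : nums.getD j 0 < v) : j ∈ popGE nums v s := by
  induction s with
  | nil => simp at hj
  | cons a t ih =>
    rw [popGE]
    split
    · rename_i hge
      rcases List.mem_cons.mp hj with rfl | hj'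
      · omega
      · exact ih hj'
    · exact hj

lemma popGE_head {nums : List Int} {v : Int} {s : List Nat} {j : Nat} {rest : List Nat}
    (h : popGE nums v s = j :: rest) : nums.getD j 0 < v := by
  induction s with
  | nil => simp [popGE] at h
  | cons a t ih =>
    rw [popGE] at h
    split at h
    · exact ih h
    · rename_i hlt
      injection h with h1 h2
      subst h1
      omega

lemma popGE_pairwise {R : Nat → Nat → Prop} {nums : List Int} {v : Int} {s : List Nat}
    (h : List.Pairwise R s) : List.Pairwise R (popGE nums v s) :=
  List.Pairwise.sublist (popGE_suffix nums v s).sublist h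

lemma popGE_all_lt {nums : List Int} {v : Int} {s : List Nat}
    (hp : List.Pairwise (fun a b => nums.getD b 0 < nums.getD a 0) s)
    {j : Nat} (hj : j ∈ popGE nums v s) : nums.getD j 0 < v := by
  rcases hres : popGE nums v s with - | ⟨j0, rest⟩
  · rw [hres] at hj; simp at hj
  · have h0 := popGE_head hres
    have hpr := popGE_pairwise (nums := nums) (v := v) hp
    rw [hres] at hj hpr
    rcases List.mem_cons.mp hj with rfl | hj'
    · exact h0
    · exact lt_trans ((List.pairwise_cons.mp hpr).1 j hj') h0

-- greatest/least witnesses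
lemma exists_greatest (P : Nat → Prop) [DecidablePred P] :
    ∀ i, (∃ j, j < i ∧ P j) → ∃ j, j < i ∧ P j ∧ ∀ k, j < k → k < i → ¬ P k := by
  intro i
  induction i with
  | zero => rintro ⟨j, hj, -⟩; omega
  | succ i ih =>
    rintro ⟨j, hj, hP⟩
    by_cases hi : P i
    · exact ⟨i, Nat.lt_succ_self i, hi, fun k h1 h2 => by omega⟩
    · have hj' : j < i := by
        rcases Nat.lt_or_ge j i with h | h
        · exact h
        · exfalso; have : j = i := by omega
          exact hi (this ▸ hP)
      obtain ⟨j0, h1, h2, h3⟩ := ih ⟨j, hj', hP⟩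
      refine ⟨j0, by omega, h2, fun k hk1 hk2 => ?_⟩
      rcases Nat.lt_or_ge k i with h | h
      · exact h3 k hk1 h
      · have : k = i := by omega
        exact this ▸ hi

lemma exists_least (P : Nat → Prop) [DecidablePred P] (h : ∃ j, P j) :
    ∃ j, P j ∧ ∀ k, k < j → ¬ P k :=
  ⟨Nat.find h, Nat.find_spec h, fun k hk => Nat.find_min h hk⟩

-- A's left stack, step by step: SL i is the stack when i is about to be processed
def SL (nums : List Int) : Nat → List Nat
  | 0 => []
  | i + 1 => i :: popGE nums (nums.getD i 0) (SL nums i)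

def StkL (nums : List Int) (i : Nat) (s : List Nat) : Prop :=
  List.Pairwise (fun a b => b < a ∧ nums.getD b 0 < nums.getD a 0) s ∧
  ∀ j, j ∈ s ↔ (j < i ∧ ∀ k, j < k → k < i → nums.getD j 0 < nums.getD k 0)

lemma SL_inv (nums : List Int) : ∀ i, StkL nums i (SL nums i) := by
  intro i
  induction i with
  | zero => exact ⟨by simp [SL], by intro j; simp [SL]⟩
  | succ i ih =>
    obtain ⟨hpw, hmem⟩ := ih
    have hsub : ∀ j ∈ popGE nums (nums.getD i 0) (SL nums i),
        j < i ∧ ∀ k, j < k → k < i → nums.getD j 0 < nums.getD k 0 :=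
      fun j hj => (hmem j).mp (popGE_mem hj)
    have hval : ∀ j ∈ popGE nums (nums.getD i 0) (SL nums i),
        nums.getD j 0 < nums.getD i 0 :=
      fun j hj => popGE_all_lt (hpw.imp (fun h => h.2)) hj
    constructor
    · rw [SL]
      exact List.pairwise_cons.mpr
        ⟨fun j hj => ⟨(hsub j hj).1, hval j hj⟩, popGE_pairwise hpw⟩
    · intro j
      rw [SL]
      simp only [List.mem_cons]
      constructor
      · rintro (rfl | hj)
        · exact ⟨Nat.lt_succ_self _, fun k hk1 hk2 => by omega⟩
        · obtain ⟨hji, hkk⟩ := hsub j hj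
          refine ⟨by omega, fun k hk1 hk2 => ?_⟩
          rcases Nat.lt_or_ge k i with h | h
          · exact hkk k hk1 h
          · have : k = i := by omega
            exact this ▸ hval j hj
      · rintro ⟨hji, hall⟩
        by_cases hj : j = i
        · exact Or.inl hj
        · have hji' : j < i := by omega
          exact Or.inr (popGE_mem_of
            ((hmem j).mpr ⟨hji', fun k hk1 hk2 => hall k hk1 (by omega)⟩)
            (hall i hji' (Nat.lt_succ_self i)))

lemma popGE_SL_nil {nums : List Int} {v : Int} {i : Nat}
    (h : popGE nums v (SL nums i) = []) : ∀ j, j < i → v ≤ nums.getD j 0 := by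
  by_contra hc
  push_neg at hc
  obtain ⟨j, hj, hlt⟩ := hc
  obtain ⟨J, hJi, hJP, hJmax⟩ :=
    exists_greatest (fun j => nums.getD j 0 < v) i ⟨j, hj, hlt⟩
  have hJs : J ∈ SL nums i :=
    ((SL_inv nums i).2 J).mpr ⟨hJi, fun k h1 h2 =>
      lt_of_lt_of_le hJP (not_lt.mp (hJmax k h1 h2))⟩
  have := popGE_mem_of hJs hJP (v := v)
  rw [h] at this
  simp at this

lemma popGE_SL_cons {nums : List Int} {v : Int} {i : Nat} {j : Nat} {rest : List Nat}
    (h : popGE nums v (SL nums i) = j :: rest) :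
    j < i ∧ nums.getD j 0 < v ∧ ∀ k, j < k → k < i → v ≤ nums.getD k 0 := by
  have hjmem : j ∈ SL nums i := popGE_mem (h ▸ List.mem_cons_self)
  have hji : j < i := (((SL_inv nums i).2 j).mp hjmem).1
  have hjv : nums.getD j 0 < v := popGE_head h
  refine ⟨hji, hjv, ?_⟩
  by_contra hc
  push_neg at hc
  obtain ⟨k, hk1, hk2, hkv⟩ := hc
  obtain ⟨K, hKi, hKP, hKmax⟩ :=
    exists_greatest (fun k => j < k ∧ nums.getD k 0 < v) i ⟨k, hk2, hk1, hkv⟩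
  have hKs : K ∈ SL nums i :=
    ((SL_inv nums i).2 K).mpr ⟨hKi, fun m h1 h2 => by
      have hm : ¬ (j < m ∧ nums.getD m 0 < v) := hKmax m h1 h2
      have : v ≤ nums.getD m 0 := by
        by_contra hmm
        exact hm ⟨by omega, by omega⟩
      omega⟩
  have hKin := popGE_mem_of hKs hKP.2
  rw [h] at hKin
  rcases List.mem_cons.mp hKin with rfl | hKin'
  · omega
  · have hpw := popGE_pairwise (nums := nums) (v := v) (SL_inv nums i).1
    rw [h] at hpw
    have := (List.pairwise_cons.mp hpw).1 K hKin'
    omega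

-- the value A's first loop stores at position i (0 if the stack is empty)
def LA (nums : List Int) (i : Nat) : Nat :=
  match popGE nums (nums.getD i 0) (SL nums i) with
  | [] => 0
  | j :: _ => j + 1

def fLA (nums : List Int) (i : Nat) : Int :=
  match popGE nums (nums.getD i 0) (SL nums i) with
  | [] => 0
  | j :: _ => (j : Int) + 1

lemma fLA_eq (nums : List Int) (i : Nat) : fLA nums i = ((LA nums i : Nat) : Int) := by
  unfold fLA LA
  rcases h : popGE nums (nums.getD i 0) (SL nums i) with - | ⟨j, rest⟩ <;> simp

lemma LA_char (nums : List Int) (i : Nat) : LchP nums (nums.getD i 0) i (LA nums i) := by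
  rcases h : popGE nums (nums.getD i 0) (SL nums i) with - | ⟨j, rest⟩
  · have hLA : LA nums i = 0 := by unfold LA; rw [h]
    exact ⟨hLA ▸ Nat.zero_le _, fun k hk1 hk2 => popGE_SL_nil h k hk2, Or.inl hLA⟩
  · have hLA : LA nums i = j + 1 := by unfold LA; rw [h]
    obtain ⟨hji, hjv, hmax⟩ := popGE_SL_cons h
    rw [hLA]
    refine ⟨by omega, fun k hk1 hk2 => hmax k (by omega) hk2, Or.inr (by simpa using hjv)⟩


-- list bookkeeping helpers
lemma set_len_append {α : Type} (l₁ : List α) (x : α) (l₂ : List α) (a : α) :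
    (l₁ ++ x :: l₂).set l₁.length a = l₁ ++ a :: l₂ := by
  induction l₁ with
  | nil => simp
  | cons b tl ih => simp [ih]

lemma getD_set_self {α : Type} (L : List α) (i : Nat) (v d : α) (h : i < L.length) :
    (L.set i v).getD i d = v := by
  rw [List.getD_eq_getElem _ _ (by simpa using h)]
  simp

lemma getD_set_ne {α : Type} (L : List α) (i j : Nat) (v d : α) (h : i ≠ j) :
    (L.set i v).getD j d = L.getD j d := by
  simp [List.getD_eq_getElem?_getD, List.getElem?_set_ne h]

lemma getD_map_range {α : Type} (f : Nat → α) (d : α) {i n : Nat} (hi : i < n) :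
    ((List.range n).map f).getD i d = f i := by
  rw [List.getD_eq_getElem _ _ (by simpa using hi)]
  simp

lemma getD_map_range' {α : Type} (f : Nat → α) (d : α) {i n : Nat} (hi : i < n) :
    ((List.range' 0 n).map f).getD i d = f i := by
  rw [List.getD_eq_getElem _ _ (by simpa using hi)]
  simp

-- A's first loop, characterised
lemma A_left_state (nums : List Int) : ∀ t, t ≤ nums.length →
    (List.range t).foldl (stepAL nums) (List.replicate nums.length 0, ([] : List Nat))
    = ((List.range t).map (fLA nums) ++ List.replicate (nums.length - t) (0 : Int), SL nums t) := by
  intro t ht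
  induction t with
  | zero => simp [SL]
  | succ t ih =>
    rw [List.range_succ, List.foldl_append, ih (by omega), List.foldl_cons, List.foldl_nil]
    have hrep : nums.length - t = (nums.length - (t + 1)) + 1 := by omega
    have hM : ((List.range t).map (fLA nums)).length = t := by simp
    rcases h : popGE nums (nums.getD t 0) (SL nums t) with - | ⟨j, rest⟩
    · have hf : fLA nums t = 0 := by unfold fLA; rw [h]
      simp only [stepAL, h, Prod.mk.injEq]
      constructor
      · rw [hrep, List.replicate_succ]
        simp [hf]
      · rw [SL, h]
    · have hf : fLA nums t = (j : Int) + 1 := by unfold fLA; rw [h]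
      simp only [stepAL, h, Prod.mk.injEq]
      constructor
      · have hset := set_len_append ((List.range t).map (fLA nums)) (0 : Int)
          (List.replicate (nums.length - (t + 1)) 0) ((j : Int) + 1)
        rw [hM] at hset
        rw [hrep, List.replicate_succ, hset]
        simp [hf]
      · rw [SL, h]

-- A's right stack: SR t is the stack after the t largest indices were processed
def SR (nums : List Int) : Nat → List Nat
  | 0 => []
  | t + 1 => (nums.length - 1 - t) ::
      popGE nums (nums.getD (nums.length - 1 - t) 0) (SR nums t)

lemma SR_inv (nums : List Int) : ∀ t, t ≤ nums.length →
    List.Pairwise (fun a b => a < b ∧ nums.getD b 0 < nums.getD a 0) (SR nums t) ∧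
    ∀ j, j ∈ SR nums t ↔ (nums.length - t ≤ j ∧ j < nums.length ∧
        ∀ k, nums.length - t ≤ k → k < j → nums.getD j 0 < nums.getD k 0) := by
  intro t
  induction t with
  | zero =>
    intro _
    constructor
    · simp [SR]
    · intro j; rw [SR]; simp; omega
  | succ t ih =>
    intro ht
    obtain ⟨hpw, hmem⟩ := ih (by omega)
    have hm1 : nums.length - (t + 1) = nums.length - 1 - t := by omega
    have hm2 : nums.length - t = (nums.length - 1 - t) + 1 := by omega
    set m := nums.length - 1 - t with hmdef
    have hsub : ∀ j ∈ popGE nums (nums.getD m 0) (SR nums t),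
        nums.length - t ≤ j ∧ j < nums.length ∧
          ∀ k, nums.length - t ≤ k → k < j → nums.getD j 0 < nums.getD k 0 :=
      fun j hj => (hmem j).mp (popGE_mem hj)
    have hval : ∀ j ∈ popGE nums (nums.getD m 0) (SR nums t),
        nums.getD j 0 < nums.getD m 0 :=
      fun j hj => popGE_all_lt (hpw.imp (fun h => h.2)) hj
    constructor
    · rw [SR]
      exact List.pairwise_cons.mpr
        ⟨fun j hj => ⟨by have := (hsub j hj).1; omega, hval j hj⟩, popGE_pairwise hpw⟩
    · intro j
      rw [SR]
      simp only [List.mem_cons]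
      constructor
      · rintro (rfl | hj)
        · exact ⟨by omega, by omega, fun k hk1 hk2 => by omega⟩
        · obtain ⟨hj1, hj2, hkk⟩ := hsub j hj
          refine ⟨by omega, hj2, fun k hk1 hk2 => ?_⟩
          rcases Nat.lt_or_ge k (nums.length - t) with h | h
          · have : k = m := by omega
            exact this ▸ hval j hj
          · exact hkk k h hk2
      · rintro ⟨hj1, hj2, hall⟩
        by_cases hj : j = m
        · exact Or.inl hj
        · have hj' : nums.length - t ≤ j := by omega
          exact Or.inr (popGE_mem_of
            ((hmem j).mpr ⟨hj', hj2, fun k hk1 hk2 => hall k (by omega) hk2⟩)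
            (hall m (by omega) (by omega)))

lemma popGE_SR_nil {nums : List Int} {v : Int} {t : Nat} (ht : t ≤ nums.length)
    (h : popGE nums v (SR nums t) = []) :
    ∀ j, nums.length - t ≤ j → j < nums.length → v ≤ nums.getD j 0 := by
  by_contra hc
  push_neg at hc
  obtain ⟨j, hj1, hj2, hlt⟩ := hc
  obtain ⟨J, hJP, hJmin⟩ := exists_least
    (fun j => nums.length - t ≤ j ∧ j < nums.length ∧ nums.getD j 0 < v) ⟨j, hj1, hj2, hlt⟩
  obtain ⟨hJ1, hJ2, hJ3⟩ := hJP
  have hJs : J ∈ SR nums t :=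
    (((SR_inv nums t ht).2 J)).mpr ⟨hJ1, hJ2, fun k hk1 hk2 => by
      have hk : ¬ (nums.length - t ≤ k ∧ k < nums.length ∧ nums.getD k 0 < v) := hJmin k hk2
      have : v ≤ nums.getD k 0 := by
        by_contra hh
        exact hk ⟨hk1, by omega, by omega⟩
      omega⟩
  have := popGE_mem_of hJs hJ3 (v := v)
  rw [h] at this
  simp at this

lemma popGE_SR_cons {nums : List Int} {v : Int} {t : Nat} {j : Nat} {rest : List Nat}
    (ht : t ≤ nums.length) (h : popGE nums v (SR nums t) = j :: rest) :
    nums.length - t ≤ j ∧ j < nums.length ∧ nums.getD j 0 < v ∧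
      ∀ k, nums.length - t ≤ k → k < j → v ≤ nums.getD k 0 := by
  have hjmem : j ∈ SR nums t := popGE_mem (h ▸ List.mem_cons_self)
  obtain ⟨hj1, hj2, -⟩ := ((SR_inv nums t ht).2 j).mp hjmem
  have hjv : nums.getD j 0 < v := popGE_head h
  refine ⟨hj1, hj2, hjv, ?_⟩
  by_contra hc
  push_neg at hc
  obtain ⟨k, hk1, hk2, hkv⟩ := hc
  obtain ⟨K, hKP, hKmin⟩ := exists_least
    (fun k => nums.length - t ≤ k ∧ k < nums.length ∧ nums.getD k 0 < v)
    ⟨k, hk1, by omega, hkv⟩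
  obtain ⟨hK1, hK2, hK3⟩ := hKP
  have hKk : K ≤ k := by
    by_contra hh
    exact hKmin k (by omega) ⟨hk1, by omega, hkv⟩
  have hKs : K ∈ SR nums t :=
    (((SR_inv nums t ht).2 K)).mpr ⟨hK1, hK2, fun m hm1 hm2 => by
      have hm : ¬ (nums.length - t ≤ m ∧ m < nums.length ∧ nums.getD m 0 < v) := hKmin m hm2
      have : v ≤ nums.getD m 0 := by
        by_contra hh
        exact hm ⟨hm1, by omega, by omega⟩
      omega⟩
  have hKin := popGE_mem_of hKs hK3
  rw [h] at hKin
  rcases List.mem_cons.mp hKin with rfl | hKin'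
  · omega
  · have hpw := popGE_pairwise (nums := nums) (v := v) (SR_inv nums t ht).1
    rw [h] at hpw
    have := (List.pairwise_cons.mp hpw).1 K hKin'
    omega

-- the value A's second loop stores at position i (n-1 if the stack is empty)
def RA (nums : List Int) (i : Nat) : Nat :=
  match popGE nums (nums.getD i 0) (SR nums (nums.length - 1 - i)) with
  | [] => nums.length - 1
  | j :: _ => j - 1

def fRA (nums : List Int) (i : Nat) : Int :=
  match popGE nums (nums.getD i 0) (SR nums (nums.length - 1 - i)) with
  | [] => (nums.length : Int) - 1
  | j :: _ => (j : Int) - 1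

lemma RA_char (nums : List Int) (i : Nat) (hi : i < nums.length) :
    RchP nums (nums.getD i 0) nums.length i (RA nums i) := by
  have ht : nums.length - 1 - i ≤ nums.length := by omega
  have hnt : nums.length - (nums.length - 1 - i) = i + 1 := by omega
  rcases h : popGE nums (nums.getD i 0) (SR nums (nums.length - 1 - i)) with - | ⟨j, rest⟩
  · have hRA : RA nums i = nums.length - 1 := by unfold RA; rw [h]
    rw [hRA]
    exact ⟨by omega, by omega,
      fun k hk1 hk2 => popGE_SR_nil ht h k (by omega) (by omega), Or.inl rfl⟩
  · have hRA : RA nums i = j - 1 := by unfold RA; rw [h]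
    obtain ⟨hj1, hj2, hjv, hmin⟩ := popGE_SR_cons ht h
    rw [hnt] at hj1 hmin
    rw [hRA]
    refine ⟨by omega, by omega, fun k hk1 hk2 => hmin k (by omega) (by omega), Or.inr ?_⟩
    have hj : j - 1 + 1 = j := by omega
    rw [hj]
    exact hjv

lemma fRA_eq (nums : List Int) (i : Nat) (hi : i < nums.length) :
    fRA nums i = ((RA nums i : Nat) : Int) := by
  have ht : nums.length - 1 - i ≤ nums.length := by omega
  have hnt : nums.length - (nums.length - 1 - i) = i + 1 := by omega
  unfold fRA RA
  rcases h : popGE nums (nums.getD i 0) (SR nums (nums.length - 1 - i)) with - | ⟨j, rest⟩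
  · simp only
    omega
  · obtain ⟨hj1, -, -, -⟩ := popGE_SR_cons ht h
    simp only
    omega

-- A's second loop, characterised (downward induction over the reversed range)
lemma A_right_state (nums : List Int) : ∀ m, m ≤ nums.length →
    ((List.range m).reverse).foldl (stepAR nums)
      (List.replicate m ((nums.length : Int) - 1) ++
        (List.range' m (nums.length - m)).map (fRA nums), SR nums (nums.length - m))
    = ((List.range' 0 nums.length).map (fRA nums), SR nums nums.length) := by
  intro m hm
  induction m with
  | zero => simp
  | succ m ih =>
    have hrev : (List.range (m + 1)).reverse = m :: (List.range m).reverse := by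
      rw [List.range_succ]; simp
    rw [hrev, List.foldl_cons]
    have h1 : nums.length - m = (nums.length - (m + 1)) + 1 := by omega
    have h2 : nums.length - 1 - (nums.length - (m + 1)) = m := by omega
    have h3 : nums.length - 1 - m = nums.length - (m + 1) := by omega
    have hsplit : ∀ X : List Int, List.replicate (m + 1) ((nums.length : Int) - 1) ++ X
        = List.replicate m ((nums.length : Int) - 1) ++ ((nums.length : Int) - 1) :: X := by
      intro X
      rw [List.replicate_succ', List.append_assoc]
      rfl
    have hlen : (List.replicate m ((nums.length : Int) - 1)).length = m := by simp
    have hstep : stepAR nums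
        (List.replicate (m + 1) ((nums.length : Int) - 1) ++
          (List.range' (m + 1) (nums.length - (m + 1))).map (fRA nums),
          SR nums (nums.length - (m + 1))) m
        = (List.replicate m ((nums.length : Int) - 1) ++
            (List.range' m (nums.length - m)).map (fRA nums), SR nums (nums.length - m)) := by
      have hSR : SR nums (nums.length - m)
          = m :: popGE nums (nums.getD m 0) (SR nums (nums.length - (m + 1))) := by
        rw [h1, SR, h2]
      rcases h : popGE nums (nums.getD m 0) (SR nums (nums.length - (m + 1))) with - | ⟨j, rest⟩
      · have hf : fRA nums m = (nums.length : Int) - 1 := by unfold fRA; rw [h3, h]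
        simp only [stepAR, h, Prod.mk.injEq]
        constructor
        · rw [hsplit, h1, List.range'_succ, List.map_cons, hf]
        · rw [hSR, h]
      · have hf : fRA nums m = (j : Int) - 1 := by unfold fRA; rw [h3, h]
        simp only [stepAR, h, Prod.mk.injEq]
        constructor
        · have hset := set_len_append (List.replicate m ((nums.length : Int) - 1))
            ((nums.length : Int) - 1)
            ((List.range' (m + 1) (nums.length - (m + 1))).map (fRA nums)) ((j : Int) - 1)
          rw [hlen] at hset
          rw [hsplit, hset, h1, List.range'_succ, List.map_cons, hf]
        · rw [hSR, h]
    rw [hstep]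
    exact ih (by omega)

-- B's jumps land exactly on the characterised bounds
lemma jumpL_spec (nums : List Int) (v : Int) (L : List Nat) (i : Nat)
    (hL : ∀ j, j < i → LchP nums (nums.getD j 0) j (L.getD j 0)) :
    ∀ fuel l, l ≤ fuel → l ≤ i → (∀ k, l ≤ k → k < i → v ≤ nums.getD k 0) →
    LchP nums v i (jumpL nums v L fuel l) := by
  intro fuel
  induction fuel with
  | zero =>
    intro l h1 h2 h3
    have hl : l = 0 := by omega
    subst hl
    exact ⟨Nat.zero_le _, h3, Or.inl rfl⟩
  | succ fuel ih =>
    intro l h1 h2 h3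
    rw [jumpL]
    split
    · rename_i hc
      obtain ⟨hl0, hge⟩ := hc
      have hl1 : l - 1 < i := by omega
      obtain ⟨ha, hb, hc'⟩ := hL (l - 1) hl1
      apply ih (L.getD (l - 1) 0) (by omega) (by omega)
      intro k hk1 hk2
      rcases Nat.lt_or_ge k (l - 1) with h | h
      · exact le_trans hge (hb k hk1 h)
      · rcases Nat.lt_or_ge k l with h' | h'
        · have hk : k = l - 1 := by omega
          rw [hk]
          exact hge
        · exact h3 k h' hk2
    · rename_i hc
      refine ⟨h2, h3, ?_⟩
      by_cases hl : l = 0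
      · exact Or.inl hl
      · right
        have : ¬ (v ≤ nums.getD (l - 1) 0) := fun hh => hc ⟨by omega, hh⟩
        omega

lemma jumpR_spec (nums : List Int) (v : Int) (R : List Nat) (i : Nat)
    (hi : i < nums.length)
    (hR : ∀ j, i < j → j < nums.length →
      RchP nums (nums.getD j 0) nums.length j (R.getD j 0)) :
    ∀ fuel r, nums.length - r ≤ fuel → i ≤ r → r < nums.length →
      (∀ k, i < k → k ≤ r → v ≤ nums.getD k 0) →
    RchP nums v nums.length i (jumpR nums v R nums.length fuel r) := by
  intro fuel
  induction fuel with
  | zero =>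
    intro r h1 h2 h3 h4
    omega
  | succ fuel ih =>
    intro r h1 h2 h3 h4
    rw [jumpR]
    split
    · rename_i hc
      obtain ⟨hrn, hge⟩ := hc
      have hr1 : r + 1 < nums.length := by omega
      obtain ⟨ha, hb, hcc, hd⟩ := hR (r + 1) (by omega) hr1
      apply ih (R.getD (r + 1) 0) (by omega) (by omega) hb
      intro k hk1 hk2
      rcases Nat.lt_or_ge k (r + 1) with h | h
      · exact h4 k hk1 (by omega)
      · rcases Nat.lt_or_ge (r + 1) k with h' | h'
        · exact le_trans hge (hcc k h' hk2)
        · have hk : k = r + 1 := by omega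
          rw [hk]
          exact hge
    · rename_i hc
      refine ⟨h2, h3, h4, ?_⟩
      by_cases hr : r = nums.length - 1
      · exact Or.inl hr
      · right
        have : ¬ (v ≤ nums.getD (r + 1) 0) := fun hh => hc ⟨by omega, hh⟩
        omega

-- B's first loop stores exactly A's left bounds
lemma B_left_state (nums : List Int) : ∀ t, t ≤ nums.length →
    ((List.range t).foldl (stepBL nums nums.length) (List.replicate nums.length 0)).length
      = nums.length ∧
    ∀ j, j < t →
      ((List.range t).foldl (stepBL nums nums.length) (List.replicate nums.length 0)).getD j 0
        = LA nums j := by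
  intro t
  induction t with
  | zero => intro _; exact ⟨by simp, fun j hj => by omega⟩
  | succ t ih =>
    intro ht
    obtain ⟨hlen, hval⟩ := ih (by omega)
    rw [List.range_succ, List.foldl_append, List.foldl_cons, List.foldl_nil]
    set L := (List.range t).foldl (stepBL nums nums.length) (List.replicate nums.length 0)
      with hLdef
    have hjmp : LchP nums (nums.getD t 0) t (jumpL nums (nums.getD t 0) L nums.length t) :=
      jumpL_spec nums _ L t
        (fun j hj => by rw [hval j hj]; exact LA_char nums j)
        nums.length t (by omega) le_rfl (fun k hk1 hk2 => by omega)
    have hjv : jumpL nums (nums.getD t 0) L nums.length t = LA nums t :=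
      LchP_unique hjmp (LA_char nums t)
    refine ⟨by simp [stepBL, hlen], fun j hj => ?_⟩
    rcases Nat.lt_or_ge j t with h | h
    · rw [stepBL, getD_set_ne _ _ _ _ _ (by omega)]
      exact hval j h
    · have hjt : j = t := by omega
      subst hjt
      rw [stepBL, getD_set_self _ _ _ _ (by rw [hlen]; omega), hjv]

-- B's second loop stores exactly A's right bounds
lemma B_right_state (nums : List Int) : ∀ m, m ≤ nums.length → ∀ R : List Nat,
    R.length = nums.length →
    (∀ j, m ≤ j → j < nums.length → R.getD j 0 = RA nums j) →
    (((List.range m).reverse).foldl (stepBR nums nums.length) R).length = nums.length ∧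
    ∀ j, j < nums.length →
      (((List.range m).reverse).foldl (stepBR nums nums.length) R).getD j 0 = RA nums j := by
  intro m
  induction m with
  | zero =>
    intro _ R hlen hR
    exact ⟨by simpa using hlen, fun j hj => by simpa using hR j (Nat.zero_le _) hj⟩
  | succ m ih =>
    intro hm R hlen hR
    have hrev : (List.range (m + 1)).reverse = m :: (List.range m).reverse := by
      rw [List.range_succ]; simp
    rw [hrev, List.foldl_cons]
    apply ih (by omega)
    · simp [stepBR, hlen]
    · intro j hj1 hj2
      have hjmp : RchP nums (nums.getD m 0) nums.length m
          (jumpR nums (nums.getD m 0) R nums.length nums.length m) :=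
        jumpR_spec nums _ R m (by omega)
          (fun j' hj' hj'' => by rw [hR j' (by omega) hj'']; exact RA_char nums j' hj'')
          nums.length m (by omega) le_rfl (by omega) (fun k hk1 hk2 => by omega)
      have hjv : jumpR nums (nums.getD m 0) R nums.length nums.length m = RA nums m :=
        RchP_unique hjmp (RA_char nums m (by omega))
      rcases Nat.lt_or_ge m j with h | h
      · rw [stepBR, getD_set_ne _ _ _ _ _ (by omega)]
        exact hR j (by omega) hj2
      · have hjm : j = m := by omega
        subst hjm
        rw [stepBR, getD_set_self _ _ _ _ (by rw [hlen]; omega), hjv]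

-- ===== VERDICT (by name: the statement is the Claim_ definition above) =====
theorem max_of_min_subarray_spec : Claim_equal_max_of_min_subarray := by
  intro nums _
  unfold Spec_max_of_min_subarray
  simp only [max_of_min_subarray, max_of_min_subarray_alt]
  have hAL := A_left_state nums nums.length le_rfl
  simp only [Nat.sub_self, List.replicate_zero, List.append_nil] at hAL
  have hAR := A_right_state nums nums.length le_rfl
  have hinit : (List.replicate nums.length ((nums.length : Int) - 1) ++
      (List.range' nums.length (nums.length - nums.length)).map (fRA nums),
      SR nums (nums.length - nums.length))
      = (List.replicate nums.length ((nums.length : Int) - 1), ([] : List Nat)) := by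
    rw [Nat.sub_self]
    simp [SR]
  rw [hinit] at hAR
  rw [hAL, hAR]
  have hBL := B_left_state nums nums.length le_rfl
  have hBR := B_right_state nums nums.length le_rfl (List.replicate nums.length 0)
    (by simp) (fun j h1 h2 => by omega)
  apply PySem.List.foldl_congr_mem
  intro acc i hi
  have hi' : i < nums.length := List.mem_range.mp hi
  rw [getD_map_range _ _ hi', getD_map_range' _ _ hi', fLA_eq, fRA_eq nums i hi',
    hBL.2 i hi', hBR.2 i hi']
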